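-- pv_equiv track=rewrite | github.com/pisterlabs/promptset | data/scraping-2.0/repos/vbursztyn~compositional-fine-tuning/code~restaurants_domain~run_exp_chain_of_thought_restaurants.py | is_answer_before_candidate
-- ===== SOURCE A (Python) =====
-- def is_answer_before_candidate(answer, wrong, top_predictions):
--     idx_wrong = 5
--     for i, key in enumerate(top_predictions):
--         if wrong.startswith(key):
--             idx_wrong = i
--             break
--
--     idx_answer = 5
--     for i, key in enumerate(top_predictions):
--         if answer.startswith(key):
--             idx_answer = i
--             break
--
--     if idx_answer < idx_wrong:
--         return True
--     return False
-- ===== SOURCE B (Python) =====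
-- def is_answer_before_candidate(answer, wrong, top_predictions):
--     idx_answer = idx_wrong = 5
--     found_a = found_w = False
--     for i, key in enumerate(top_predictions):
--         if not found_w and wrong.startswith(key):
--             idx_wrong, found_w = i, True
--         if not found_a and answer.startswith(key):
--             idx_answer, found_a = i, True
--         if found_a and found_w:
--             break
--     return idx_answer < idx_wrong
-- ===== Notes on version B (the rewrite author's own statement) =====
-- stated objective: alternative
-- what changed: Replaces A's two sequential first-match scans of top_predictions with one fused single pass that tracks both first-match indices and breaks early once both are found.
import Mathlib
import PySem

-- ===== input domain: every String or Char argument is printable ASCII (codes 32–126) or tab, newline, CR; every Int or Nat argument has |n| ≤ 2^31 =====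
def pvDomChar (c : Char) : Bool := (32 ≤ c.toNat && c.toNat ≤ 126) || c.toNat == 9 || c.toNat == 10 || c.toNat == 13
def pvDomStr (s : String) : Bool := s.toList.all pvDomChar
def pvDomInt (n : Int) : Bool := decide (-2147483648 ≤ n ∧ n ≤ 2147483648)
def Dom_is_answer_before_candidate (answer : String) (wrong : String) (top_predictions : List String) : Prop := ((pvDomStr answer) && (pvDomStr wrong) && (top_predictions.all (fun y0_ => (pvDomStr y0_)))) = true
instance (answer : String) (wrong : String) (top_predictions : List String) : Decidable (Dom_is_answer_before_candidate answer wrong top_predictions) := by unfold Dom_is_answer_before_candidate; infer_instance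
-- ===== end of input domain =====

-- B fuses A's two first-match scans over top_predictions into one pass with early exit; alternative decomposition, same cost.

-- ===== PORT A =====
-- A's "for i, key in enumerate(...): if s.startswith(key): idx = i; break" loop, default 5
def pvFirstIdx (s : String) (l : List String) (i : Int) : Int :=
  match l with
  | [] => 5
  | key :: rest => if PySem.Str.startswith s key then i else pvFirstIdx s rest (i + 1)

def is_answer_before_candidate (answer : String) (wrong : String) (top_predictions : List String) : Bool :=
  let idx_wrong := pvFirstIdx wrong top_predictions 0
  let idx_answer := pvFirstIdx answer top_predictions 0
  if idx_answer < idx_wrong then true else false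

-- ===== PORT B =====
-- single fused pass: carries (i, found_a, found_w, idx_answer, idx_wrong), breaks when both found
def pvFused (answer wrong : String) (l : List String) (i : Int) (fa fw : Bool) (ia iw : Int) : Int × Int :=
  match l with
  | [] => (ia, iw)
  | key :: rest =>
    let p := if !fw && PySem.Str.startswith wrong key then (i, true) else (iw, fw)
    let q := if !fa && PySem.Str.startswith answer key then (i, true) else (ia, fa)
    if q.2 && p.2 then (q.1, p.1)
    else pvFused answer wrong rest (i + 1) q.2 p.2 q.1 p.1

def is_answer_before_candidate_alt (answer : String) (wrong : String) (top_predictions : List String) : Bool :=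
  let r := pvFused answer wrong top_predictions 0 false false 5 5
  decide (r.1 < r.2)

-- ===== PRECONDITION & SPEC =====
def Spec_is_answer_before_candidate (answer : String) (wrong : String) (top_predictions : List String) (out : Bool) : Prop := out = is_answer_before_candidate_alt answer wrong top_predictions
instance (answer : String) (wrong : String) (top_predictions : List String) (out : Bool) : Decidable (Spec_is_answer_before_candidate answer wrong top_predictions out) := by unfold Spec_is_answer_before_candidate; infer_instance

-- ===== CLAIM (what is proved, stated in full; the proofs are below) =====
def Claim_equal_is_answer_before_candidate : Prop := ∀ (answer : String) (wrong : String) (top_predictions : List String), Dom_is_answer_before_candidate answer wrong top_predictions → Spec_is_answer_before_candidate answer wrong top_predictions (is_answer_before_candidate answer wrong top_predictions)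

-- ===== LEMMAS AND PROOFS =====
-- once answer was found (fa = true), the fused loop only scans for wrong
theorem pvFused_found_a (answer wrong : String) (l : List String) (i ia : Int) :
    pvFused answer wrong l i true false ia 5 = (ia, pvFirstIdx wrong l i) := by
  induction l generalizing i with
  | nil => simp [pvFused, pvFirstIdx]
  | cons key rest ih =>
    by_cases h : PySem.Chars.startswith wrong.toList key.toList = true <;>
      simp [pvFused, pvFirstIdx, h, ih]

-- once wrong was found (fw = true), the fused loop only scans for answer
theorem pvFused_found_w (answer wrong : String) (l : List String) (i iw : Int) :
    pvFused answer wrong l i false true 5 iw = (pvFirstIdx answer l i, iw) := by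
  induction l generalizing i with
  | nil => simp [pvFused, pvFirstIdx]
  | cons key rest ih =>
    by_cases h : PySem.Chars.startswith answer.toList key.toList = true <;>
      simp [pvFused, pvFirstIdx, h, ih]

-- the fused pass computes exactly A's two first-match indices
theorem pvFused_eq (answer wrong : String) (l : List String) (i : Int) :
    pvFused answer wrong l i false false 5 5 = (pvFirstIdx answer l i, pvFirstIdx wrong l i) := by
  induction l generalizing i with
  | nil => simp [pvFused, pvFirstIdx]
  | cons key rest ih =>
    by_cases ha : PySem.Chars.startswith answer.toList key.toList = true <;>
      by_cases hw : PySem.Chars.startswith wrong.toList key.toList = true <;>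
        simp [pvFused, pvFirstIdx, ha, hw, ih, pvFused_found_a, pvFused_found_w]

-- ===== VERDICT (by name: the statement is the Claim_ definition above) =====
theorem is_answer_before_candidate_spec : Claim_equal_is_answer_before_candidate := by
  intro answer wrong tp _
  unfold Spec_is_answer_before_candidate is_answer_before_candidate is_answer_before_candidate_alt
  rw [pvFused_eq]
  by_cases h : pvFirstIdx answer tp 0 < pvFirstIdx wrong tp 0 <;> simp [h]
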